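-- pv_equiv track=rewrite | github.com/Laladj/InfoPC | Laldjee TD4.py | attracteur
-- ===== SOURCE A (Python) =====
-- def graphe_inverse(graphe:dict)->dict:
--     inverse ={sommet : [] for sommet in graphe}
--     for sommet in graphe:
--         for voisin in graphe[sommet]:
--             inverse[voisin].append(sommet)
--
--     return inverse
--
-- def etats_finaux(g:dict, j:int)->dict:
--     joueur = 3-j
--     liste = []
--     for sommet in g:
--         if g[sommet] == [] and sommet[0] == joueur:
--             liste.append(sommet)
--
--     return liste
--
-- def degres_sortants(g:dict)->dict:
--
--     return {sommet:len(g[sommet]) for sommet in g}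
--
-- def attracteur(arene:dict,joueur:int):
--     """
--
--
--     Parameters
--     ----------
--     arene : dict
--         DESCRIPTION.
--     joueur : int
--         DESCRIPTION.
--
--     Returns
--     -------
--     caclul de l'attracteur.
--
--     """
--     gInv = graphe_inverse(arene)
--     F = etats_finaux(arene, joueur)
--     d = degres_sortants(arene) #dictionnaire des degres sortants
--     joueur = 3-joueur
--     A = {} # attracteur : dictionnaire des positions gagnantes
--
--
--     def parcours(s):
--        if s not in A:
--            A[s] = True
--            if s in gInv:
--                for u in gInv[s]:
--                    if u[0] == joueur:  # Si u appartient à l'adversaire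
--                        parcours(u)
--                    else:  # Si u appartient au joueur
--                        d[u] -= 1
--                        if d[u] == 0:
--                            parcours(u)
--
--     for s in F:
--        parcours(s)
--
--     return A
-- ===== SOURCE B (Python) =====
-- def attracteur(arene, joueur):
--     # Iterative worklist version: same gInv/F/d preprocessing, but the recursive
--     # DFS is replaced by an explicit stack of pending-node frames.
--     gInv = {s: [] for s in arene}
--     for s in arene:
--         for v in arene[s]:
--             gInv[v].append(s)
--     adv = 3 - joueur
--     F = [s for s in arene if arene[s] == [] and s[0] == adv]
--     d = {s: len(arene[s]) for s in arene}
--     A = {}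
--     stack = [F]
--     while stack:
--         lst = stack[-1]
--         if not lst:
--             stack.pop()
--             continue
--         u = lst[0]
--         stack[-1] = lst[1:]
--         if u[0] != adv:
--             d[u] -= 1
--             if d[u] != 0:
--                 continue
--         if u not in A:
--             A[u] = True
--             stack.append(gInv[u])
--     return A
-- ===== Notes on version B (the rewrite author's own statement) =====
-- stated objective: alternative
-- what changed: The recursive DFS `parcours` is replaced by an iterative worklist: an explicit stack of pending-predecessor frames processed in a while loop, performing the same membership checks and per-edge out-degree decrements in the same order (gInv, F and d are built as in A).
import Mathlib
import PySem

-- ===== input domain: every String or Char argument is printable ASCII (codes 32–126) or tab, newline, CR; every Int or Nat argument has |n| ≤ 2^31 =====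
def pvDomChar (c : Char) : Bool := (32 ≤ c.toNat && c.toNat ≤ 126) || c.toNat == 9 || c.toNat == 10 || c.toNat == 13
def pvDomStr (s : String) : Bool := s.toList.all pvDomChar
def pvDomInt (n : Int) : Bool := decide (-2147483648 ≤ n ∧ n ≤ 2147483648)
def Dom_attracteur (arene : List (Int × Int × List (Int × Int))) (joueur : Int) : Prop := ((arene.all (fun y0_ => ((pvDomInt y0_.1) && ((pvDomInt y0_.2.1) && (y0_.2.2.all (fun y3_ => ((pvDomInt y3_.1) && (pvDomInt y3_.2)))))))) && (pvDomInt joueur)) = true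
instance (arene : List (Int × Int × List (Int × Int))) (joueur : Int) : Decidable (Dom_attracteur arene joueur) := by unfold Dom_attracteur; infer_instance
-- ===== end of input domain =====

-- B replaces A's recursive DFS `parcours` by an iterative explicit-stack worklist with the
-- same preprocessing and the same per-edge decrements, in the same order (objective: alternative).

-- ===== PORT A =====
-- Python dict keys are pairs (owner, id); states of the traversal are (A, d).
abbrev PvNode : Type := Int × Int
abbrev PvGraph : Type := PySem.Dict PvNode (List PvNode)
abbrev PvSt : Type := PySem.Dict PvNode Bool × PySem.Dict PvNode Int

-- graphe_inverse(graphe)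
def pvGrapheInverse (g : PvGraph) : PvGraph :=
  let inverse := g.keys.foldl (fun d s => d.insert s ([] : List PvNode)) PySem.Dict.empty
  g.keys.foldl (fun inv s =>
    (g.getD s []).foldl (fun inv v => inv.modify v [] (· ++ [s])) inv) inverse

-- etats_finaux(g, j)  (list built by append)
def pvEtatsFinaux (g : PvGraph) (j : Int) : List PvNode :=
  let joueur := 3 - j
  g.keys.foldl (fun acc s => if g.getD s [] == [] && s.1 == joueur then acc ++ [s] else acc) []

-- degres_sortants(g)
def pvDegresSortants (g : PvGraph) : PySem.Dict PvNode Int :=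
  g.keys.foldl (fun d s => d.insert s ((g.getD s []).length : Int)) PySem.Dict.empty

-- the inner `for u in gInv[s]` of parcours, with `rec` the recursive call to parcours
def pvChildSteps (adv : Int) (rec : PvNode → PvSt → PvSt) : List PvNode → PvSt → PvSt
  | [], st => st
  | u :: us, st =>
    if u.1 == adv then pvChildSteps adv rec us (rec u st)
    else
      let d' := st.2.modify u 0 (· - 1)
      if d'.getD u 0 == 0 then pvChildSteps adv rec us (rec u (st.1, d'))
      else pvChildSteps adv rec us (st.1, d')

-- parcours(s); fuel is only a totality guard for the recursion (depth ≤ #keys, see proofs)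
def pvParcours (gInv : PvGraph) (adv : Int) : Nat → PvNode → PvSt → PvSt
  | 0, _, st => st
  | f + 1, s, st =>
    if st.1.contains s then st
    else
      let st' : PvSt := (st.1.insert s true, st.2)
      if gInv.contains s then
        pvChildSteps adv (fun u st => pvParcours gInv adv f u st) (gInv.getD s []) st'
      else st'

def attracteur (arene : List (Int × Int × List (Int × Int))) (joueur : Int) : List (Int × Int × Bool) :=
  let g : PvGraph := PySem.Dict.ofList (arene.map (fun e => ((e.1, e.2.1), e.2.2)))
  let gInv := pvGrapheInverse g
  let F := pvEtatsFinaux g joueur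
  let d := pvDegresSortants g
  let adv := 3 - joueur
  let res := F.foldl (fun st s => pvParcours gInv adv (g.keys.length + 1) s st)
    ((PySem.Dict.empty : PySem.Dict PvNode Bool), d)
  res.1.items.map (fun p => (p.1.1, p.1.2, p.2))

-- ===== PORT B =====
-- Source B's while-loop over an explicit stack of pending-node frames; `continue` after a
-- non-zero decrement and the shared `if u not in A` tail are the two middle branches.
def pvMachine (gInv : PvGraph) (adv : Int) : Nat → List (List PvNode) → PvSt → PvSt
  | _, [], st => st
  | f, [] :: fs, st => pvMachine gInv adv f fs st
  | f, (u :: us) :: fs, st =>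
    if u.1 != adv then
      let d' := st.2.modify u 0 (· - 1)
      if d'.getD u 0 != 0 then pvMachine gInv adv f (us :: fs) (st.1, d')
      else if st.1.contains u then pvMachine gInv adv f (us :: fs) (st.1, d')
      else
        match f with
        | 0 => (st.1, d')
        | f + 1 => pvMachine gInv adv f (gInv.getD u [] :: us :: fs) (st.1.insert u true, d')
    else
      if st.1.contains u then pvMachine gInv adv f (us :: fs) st
      else
        match f with
        | 0 => st
        | f + 1 => pvMachine gInv adv f (gInv.getD u [] :: us :: fs) (st.1.insert u true, st.2)
termination_by f stack _ => (f, (stack.map (fun l => l.length + 1)).sum)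
decreasing_by all_goals simp; omega

def attracteur_alt (arene : List (Int × Int × List (Int × Int))) (joueur : Int) : List (Int × Int × Bool) :=
  let g : PvGraph := PySem.Dict.ofList (arene.map (fun e => ((e.1, e.2.1), e.2.2)))
  let gInv := g.keys.foldl (fun inv s =>
      (g.getD s []).foldl (fun inv v => inv.modify v [] (· ++ [s])) inv)
    (g.keys.foldl (fun d s => d.insert s ([] : List PvNode)) PySem.Dict.empty)
  let adv := 3 - joueur
  let F := g.keys.filter (fun s => g.getD s [] == [] && s.1 == adv)
  let d := g.keys.foldl (fun d s => d.insert s ((g.getD s []).length : Int)) PySem.Dict.empty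
  let res := pvMachine gInv adv (g.keys.length + 1) [F]
    ((PySem.Dict.empty : PySem.Dict PvNode Bool), d)
  res.1.items.map (fun p => (p.1.1, p.1.2, p.2))

-- ===== PRECONDITION & SPEC =====
-- Pre_ excludes exactly the inputs on which Python A raises KeyError in graphe_inverse:
-- some listed neighbour is not itself a key of the arena dict.
def Pre_attracteur (arene : List (Int × Int × List (Int × Int))) (joueur : Int) : Prop :=
  (arene.all (fun e => e.2.2.all (fun v => arene.any (fun e' => e'.1 == v.1 && e'.2.1 == v.2)))) = true

instance (arene : List (Int × Int × List (Int × Int))) (joueur : Int) : Decidable (Pre_attracteur arene joueur) := by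
  unfold Pre_attracteur; infer_instance

def pvWitness_attracteur : (List (Int × Int × List (Int × Int))) × Int :=
  ([(2, 0, []), (1, 1, [(2, 0)])], 1)

def Spec_attracteur (arene : List (Int × Int × List (Int × Int))) (joueur : Int) (out : List (Int × Int × Bool)) : Prop := out = attracteur_alt arene joueur
instance (arene : List (Int × Int × List (Int × Int))) (joueur : Int) (out : List (Int × Int × Bool)) : Decidable (Spec_attracteur arene joueur out) := by unfold Spec_attracteur; infer_instance

-- ===== CLAIM (what is proved, stated in full; the proofs are below) =====
def Claim_equal_attracteur : Prop := ∀ (arene : List (Int × Int × List (Int × Int))) (joueur : Int), Dom_attracteur arene joueur → Pre_attracteur arene joueur → Spec_attracteur arene joueur (attracteur arene joueur)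

-- ===== LEMMAS AND PROOFS =====


-- the nodes of the arena; `pvUnv` counts the keys not yet in the attractor dict
def pvUnv (KL : List PvNode) (st : PvSt) : Nat := KL.countP (fun k => ! st.1.contains k)

-- every node occurring in a value of gInv is an arena key
def pvHG (gInv : PvGraph) (KL : List PvNode) : Prop := ∀ s u, u ∈ gInv.getD s [] → u ∈ KL

-- every node in every stacked frame is an arena key
def pvFOK (KL : List PvNode) (fs : List (List PvNode)) : Prop := ∀ l ∈ fs, ∀ u ∈ l, u ∈ KL

-- unfolding equations for the two fuelled recursions
theorem pvParcours_zero (gInv : PvGraph) (adv : Int) (s : PvNode) (st : PvSt) :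
    pvParcours gInv adv 0 s st = st := by
  rw [pvParcours]

theorem pvParcours_succ (gInv : PvGraph) (adv : Int) (f : Nat) (s : PvNode) (st : PvSt) :
    pvParcours gInv adv (f + 1) s st =
      if st.1.contains s then st
      else
        let st' : PvSt := (st.1.insert s true, st.2)
        if gInv.contains s then
          pvChildSteps adv (fun u st => pvParcours gInv adv f u st) (gInv.getD s []) st'
        else st' := by
  rw [pvParcours]


theorem pv_countP_lt {α : Type} (l : List α) (p q : α → Bool) (s : α) (hs : s ∈ l)
    (hp : p s = true) (hq : q s = false) (himp : ∀ x, q x = true → p x = true) :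
    l.countP q < l.countP p := by
  induction l with
  | nil => cases hs
  | cons a t ih =>
    rw [List.countP_cons, List.countP_cons]
    rcases List.mem_cons.mp hs with rfl | hmem
    · have hmono : t.countP q ≤ t.countP p := List.countP_mono_left (fun x _ => himp x)
      simp [hp, hq]; omega
    · have := ih hmem
      by_cases hqa : q a = true
      · have hpa := himp a hqa; simp [hqa, hpa]; omega
      · simp only [Bool.not_eq_true] at hqa
        simp [hqa]; split <;> omega

theorem pvChildSteps_mono (adv : Int) (rec : PvNode → PvSt → PvSt)
    (hrec : ∀ u st k, st.1.contains k = true → (rec u st).1.contains k = true) :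
    ∀ us st k, st.1.contains k = true → (pvChildSteps adv rec us st).1.contains k = true := by
  intro us
  induction us with
  | nil => intro st k hk; simpa [pvChildSteps] using hk
  | cons u us ih =>
    intro st k hk
    simp only [pvChildSteps]
    split
    · exact ih _ _ (hrec _ _ _ hk)
    · split
      · exact ih _ _ (hrec _ _ _ hk)
      · exact ih _ _ hk

theorem pvParcours_mono (gInv : PvGraph) (adv : Int) :
    ∀ f s st k, st.1.contains k = true → (pvParcours gInv adv f s st).1.contains k = true := by
  intro f
  induction f with
  | zero => intro s st k hk; simpa [pvParcours_zero] using hk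
  | succ f ih =>
    intro s st k hk
    rw [pvParcours_succ]
    split
    · exact hk
    · have hk' : ((st.1.insert s true, st.2) : PvSt).1.contains k = true := by
        simp [PySem.Dict.contains_insert, hk]
      split
      · exact pvChildSteps_mono adv _ (fun u st k hk => ih u st k hk) _ _ _ hk'
      · exact hk'

theorem pvUnv_le_length (KL : List PvNode) (st : PvSt) : pvUnv KL st ≤ KL.length :=
  List.countP_le_length

theorem pvUnv_mono_aux (KL : List PvNode) (st st' : PvSt)
    (h : ∀ k, st.1.contains k = true → st'.1.contains k = true) :
    pvUnv KL st' ≤ pvUnv KL st := by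
  apply List.countP_mono_left
  intro x _ hx
  simp only [Bool.not_eq_true'] at hx ⊢
  by_cases hc : st.1.contains x = true
  · rw [h x hc] at hx; cases hx
  · simpa using hc

theorem pvUnv_childSteps_le (gInv : PvGraph) (adv : Int) (KL : List PvNode) (f : Nat)
    (us : List PvNode) (st : PvSt) :
    pvUnv KL (pvChildSteps adv (fun u st => pvParcours gInv adv f u st) us st) ≤ pvUnv KL st :=
  pvUnv_mono_aux KL st _
    (fun k hk => pvChildSteps_mono adv _ (fun u st k hk => pvParcours_mono gInv adv f u st k hk) us st k hk)

theorem pvUnv_insert_lt (KL : List PvNode) (st : PvSt) (s : PvNode) (d : PySem.Dict PvNode Int)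
    (hs : s ∈ KL) (hc : st.1.contains s = false) :
    pvUnv KL ((st.1.insert s true, d) : PvSt) < pvUnv KL st := by
  apply pv_countP_lt KL _ _ s hs
  · simp [hc]
  · simp
  · intro x hx
    simp only [Bool.not_eq_true'] at hx ⊢
    simp only [PySem.Dict.contains_insert, Bool.or_eq_false_iff] at hx
    exact hx.2

theorem pvMachineFuel (gInv : PvGraph) (adv : Int) (KL : List PvNode) (hg : pvHG gInv KL) :
    ∀ n f1 f2 stack st, pvFOK KL stack → pvUnv KL st ≤ n → pvUnv KL st < f1 → pvUnv KL st < f2 →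
      pvMachine gInv adv f1 stack st = pvMachine gInv adv f2 stack st := by
  intro n
  induction n using Nat.strong_induction_on with
  | _ n ihn =>
    suffices inner : ∀ m stack st f1 f2, (stack.map (fun l => l.length + 1)).sum ≤ m →
        pvFOK KL stack → pvUnv KL st ≤ n → pvUnv KL st < f1 → pvUnv KL st < f2 →
        pvMachine gInv adv f1 stack st = pvMachine gInv adv f2 stack st by
      intro f1 f2 stack st hfok hn h1 h2
      exact inner _ stack st f1 f2 (le_refl _) hfok hn h1 h2
    intro m
    induction m using Nat.strong_induction_on with
    | _ m ihm =>
      intro stack st f1 f2 hm hfok hn h1 h2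
      cases stack with
      | nil => rw [pvMachine.eq_1, pvMachine.eq_1]
      | cons fr fs =>
        have hfok' : pvFOK KL fs := fun l hl => hfok l (by simp [hl])
        cases fr with
        | nil =>
          rw [pvMachine.eq_2, pvMachine.eq_2]
          refine ihm ((fs.map (fun l => l.length + 1)).sum) ?_ fs st f1 f2 (le_refl _) hfok' hn h1 h2
          simp only [List.map_cons, List.sum_cons] at hm; omega
        | cons u us =>
          cases f1 with
          | zero => omega
          | succ f1 =>
          cases f2 with
          | zero => omega
          | succ f2 =>
            rw [pvMachine.eq_4, pvMachine.eq_4]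
            have hu : u ∈ KL := hfok (u :: us) (by simp) u (by simp)
            have hfok2 : pvFOK KL (us :: fs) := by
              intro l hl x hx
              rcases List.mem_cons.mp hl with h | h
              · refine hfok (u :: us) (by simp) x ?_
                rw [h] at hx; simp [hx]
              · exact hfok l (by simp [h]) x hx
            have hmm : ((us :: fs).map (fun l => l.length + 1)).sum < m := by
              simp only [List.map_cons, List.sum_cons, List.length_cons] at hm ⊢; omega
            by_cases hadv : (u.1 != adv) = true
            · simp only [hadv, if_true]
              by_cases hz : (((st.2.modify u 0 (· - 1)).getD u 0) != 0) = true
              · simp only [hz, if_true]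
                exact ihm _ hmm (us :: fs) _ _ _ (le_refl _) hfok2 hn h1 h2
              · simp only [hz, Bool.false_eq_true, if_false]
                by_cases hc : st.1.contains u = true
                · simp only [hc, if_true]
                  exact ihm _ hmm (us :: fs) _ _ _ (le_refl _) hfok2 hn h1 h2
                · simp only [Bool.not_eq_true] at hc
                  simp only [hc, Bool.false_eq_true, if_false]
                  have hlt := pvUnv_insert_lt KL st u (st.2.modify u 0 (· - 1)) hu hc
                  have hfok3 : pvFOK KL (gInv.getD u [] :: us :: fs) := by
                    intro l hl x hx
                    rcases List.mem_cons.mp hl with rfl | hl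
                    · exact hg u x hx
                    · exact hfok2 l hl x hx
                  exact ihn (pvUnv KL ((st.1.insert u true, st.2.modify u 0 (· - 1)) : PvSt))
                    (by omega) f1 f2 _ _ hfok3 (le_refl _) (by omega) (by omega)
            · simp only [hadv, Bool.false_eq_true, if_false]
              by_cases hc : st.1.contains u = true
              · simp only [hc, if_true]
                exact ihm _ hmm (us :: fs) _ _ _ (le_refl _) hfok2 hn h1 h2
              · simp only [Bool.not_eq_true] at hc
                simp only [hc, Bool.false_eq_true, if_false]
                have hlt := pvUnv_insert_lt KL st u st.2 hu hc
                have hfok3 : pvFOK KL (gInv.getD u [] :: us :: fs) := by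
                  intro l hl x hx
                  rcases List.mem_cons.mp hl with rfl | hl
                  · exact hg u x hx
                  · exact hfok2 l hl x hx
                exact ihn (pvUnv KL ((st.1.insert u true, st.2) : PvSt))
                  (by omega) f1 f2 _ _ hfok3 (le_refl _) (by omega) (by omega)

theorem pvSim (gInv : PvGraph) (adv : Int) (KL : List PvNode) (hg : pvHG gInv KL) :
    ∀ n lst fs st f, (∀ u ∈ lst, u ∈ KL) → pvFOK KL fs → pvUnv KL st ≤ n → pvUnv KL st < f →
      pvMachine gInv adv f (lst :: fs) st =
        pvMachine gInv adv f fs (pvChildSteps adv (fun u st => pvParcours gInv adv f u st) lst st) := by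
  intro n
  induction n using Nat.strong_induction_on with
  | _ n ihn =>
    intro lst
    induction lst with
    | nil =>
      intro fs st f _ _ _ _
      rw [pvMachine.eq_2]
      simp [pvChildSteps]
    | cons u us ihus =>
      intro fs st f hus hfok hn hf
      have hu : u ∈ KL := hus u (by simp)
      have hus' : ∀ x ∈ us, x ∈ KL := fun x hx => hus x (by simp [hx])
      cases f with
      | zero => omega
      | succ f =>
        rw [pvMachine.eq_4]
        simp only [pvChildSteps]
        by_cases heq : (u.1 == adv) = true
        · have hne : (u.1 != adv) = false := by simp [bne, heq]
          simp only [heq, hne, Bool.false_eq_true, if_false, if_true]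
          by_cases hc : st.1.contains u = true
          · simp only [hc, if_true]
            have hp : pvParcours gInv adv (f + 1) u st = st := by
              rw [pvParcours_succ]; simp [hc]
            rw [hp]
            exact ihus fs st (f + 1) hus' hfok hn hf
          · simp only [Bool.not_eq_true] at hc
            simp only [hc, Bool.false_eq_true, if_false]
            have hlt := pvUnv_insert_lt KL st u st.2 hu hc
            have hst' : pvParcours gInv adv (f + 1) u st =
                pvChildSteps adv (fun u st => pvParcours gInv adv f u st) (gInv.getD u [])
                  ((st.1.insert u true, st.2) : PvSt) := by
              rw [pvParcours_succ]
              simp only [hc, Bool.false_eq_true, if_false]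
              by_cases hgi : gInv.contains u = true
              · simp [hgi]
              · simp only [Bool.not_eq_true] at hgi
                simp only [hgi, Bool.false_eq_true, if_false]
                rw [PySem.Dict.getD_of_not_contains _ _ hgi]
                simp [pvChildSteps]
            set st1 : PvSt := (st.1.insert u true, st.2) with hst1
            set st2 := pvChildSteps adv (fun u st => pvParcours gInv adv f u st) (gInv.getD u []) st1 with hst2
            have hfok2 : pvFOK KL (us :: fs) := by
              intro l hl x hx
              rcases List.mem_cons.mp hl with rfl | hl
              · exact hus' x hx
              · exact hfok l hl x hx
            have step1 : pvMachine gInv adv f (gInv.getD u [] :: us :: fs) st1 =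
                pvMachine gInv adv f (us :: fs) st2 :=
              ihn (pvUnv KL st1) (by omega) (gInv.getD u []) (us :: fs) st1 f
                (fun x hx => hg u x hx) hfok2 (le_refl _) (by omega)
            have hle2 : pvUnv KL st2 ≤ pvUnv KL st1 := pvUnv_childSteps_le gInv adv KL f _ st1
            have step2 : pvMachine gInv adv f (us :: fs) st2 =
                pvMachine gInv adv (f + 1) (us :: fs) st2 :=
              pvMachineFuel gInv adv KL hg (pvUnv KL st2) f (f + 1) (us :: fs) st2 hfok2
                (le_refl _) (by omega) (by omega)
            have step3 : pvMachine gInv adv (f + 1) (us :: fs) st2 =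
                pvMachine gInv adv (f + 1) fs
                  (pvChildSteps adv (fun u st => pvParcours gInv adv (f + 1) u st) us st2) :=
              ihn (pvUnv KL st2) (by omega) us fs st2 (f + 1) hus' hfok (le_refl _) (by omega)
            rw [step1, step2, step3, hst']
        · have hne : (u.1 != adv) = true := by simp [bne]; simpa using heq
          simp only [heq, hne, Bool.false_eq_true, if_false, if_true]
          by_cases hz0 : (((st.2.modify u 0 (· - 1)).getD u 0) == 0) = true
          · have hz : (((st.2.modify u 0 (· - 1)).getD u 0) != 0) = false := by
              simpa [bne] using hz0
            simp only [hz0, hz, Bool.false_eq_true, if_false, if_true]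
            set st1 : PvSt := (st.1, st.2.modify u 0 (· - 1)) with hst1
            have hunv1 : pvUnv KL st1 = pvUnv KL st := rfl
            by_cases hc : st.1.contains u = true
            · simp only [hc, if_true]
              have hp : pvParcours gInv adv (f + 1) u st1 = st1 := by
                rw [pvParcours_succ]
                have : st1.1.contains u = true := hc
                simp [this]
              rw [hp]
              exact ihus fs st1 (f + 1) hus' hfok (by omega) (by omega)
            · simp only [Bool.not_eq_true] at hc
              simp only [hc, Bool.false_eq_true, if_false]
              have hlt := pvUnv_insert_lt KL st u (st.2.modify u 0 (· - 1)) hu hc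
              have hst' : pvParcours gInv adv (f + 1) u st1 =
                  pvChildSteps adv (fun u st => pvParcours gInv adv f u st) (gInv.getD u [])
                    ((st.1.insert u true, st.2.modify u 0 (· - 1)) : PvSt) := by
                rw [pvParcours_succ]
                have hcc : st1.1.contains u = false := hc
                simp only [hcc, Bool.false_eq_true, if_false]
                by_cases hgi : gInv.contains u = true
                · simp [hgi, hst1]
                · simp only [Bool.not_eq_true] at hgi
                  simp only [hgi, Bool.false_eq_true, if_false]
                  rw [PySem.Dict.getD_of_not_contains _ _ hgi]
                  simp [pvChildSteps, hst1]
              set stv : PvSt := (st.1.insert u true, st.2.modify u 0 (· - 1)) with hstv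
              set st2 := pvChildSteps adv (fun u st => pvParcours gInv adv f u st) (gInv.getD u []) stv with hst2
              have hfok2 : pvFOK KL (us :: fs) := by
                intro l hl x hx
                rcases List.mem_cons.mp hl with rfl | hl
                · exact hus' x hx
                · exact hfok l hl x hx
              have step1 : pvMachine gInv adv f (gInv.getD u [] :: us :: fs) stv =
                  pvMachine gInv adv f (us :: fs) st2 :=
                ihn (pvUnv KL stv) (by omega) (gInv.getD u []) (us :: fs) stv f
                  (fun x hx => hg u x hx) hfok2 (le_refl _) (by omega)
              have hle2 : pvUnv KL st2 ≤ pvUnv KL stv := pvUnv_childSteps_le gInv adv KL f _ stv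
              have step2 : pvMachine gInv adv f (us :: fs) st2 =
                  pvMachine gInv adv (f + 1) (us :: fs) st2 :=
                pvMachineFuel gInv adv KL hg (pvUnv KL st2) f (f + 1) (us :: fs) st2 hfok2
                  (le_refl _) (by omega) (by omega)
              have step3 : pvMachine gInv adv (f + 1) (us :: fs) st2 =
                  pvMachine gInv adv (f + 1) fs
                    (pvChildSteps adv (fun u st => pvParcours gInv adv (f + 1) u st) us st2) :=
                ihn (pvUnv KL st2) (by omega) us fs st2 (f + 1) hus' hfok (le_refl _) (by omega)
              rw [step1, step2, step3, hst']
          · have hz : (((st.2.modify u 0 (· - 1)).getD u 0) != 0) = true := by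
              simp [bne]; simpa using hz0
            simp only [hz0, hz, Bool.false_eq_true, if_false, if_true]
            exact ihus fs ((st.1, st.2.modify u 0 (· - 1)) : PvSt) (f + 1) hus' hfok hn hf


theorem pvInit_getD (l : List PvNode) :
    ∀ (d : PvGraph), (∀ s, d.getD s ([] : List PvNode) = []) →
      ∀ s, (l.foldl (fun d k => d.insert k ([] : List PvNode)) d).getD s [] = [] := by
  induction l with
  | nil => intro d hd s; exact hd s
  | cons a t ih =>
    intro d hd s
    simp only [List.foldl_cons]
    refine ih _ ?_ s
    intro x
    rw [PySem.Dict.getD_insert]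
    split
    · rfl
    · exact hd x

theorem pvInner_inv (KL : List PvNode) (s0 : PvNode) (hs0 : s0 ∈ KL) (vs : List PvNode) :
    ∀ (inv : PvGraph), (∀ s u, u ∈ inv.getD s [] → u ∈ KL) →
      ∀ s u, u ∈ (vs.foldl (fun inv v => inv.modify v [] (· ++ [s0])) inv).getD s [] → u ∈ KL := by
  induction vs with
  | nil => intro inv hinv; exact hinv
  | cons v vs ih =>
    intro inv hinv
    simp only [List.foldl_cons]
    refine ih _ ?_
    intro s u hu
    rw [PySem.Dict.getD_modify] at hu
    by_cases hsv : s = v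
    · simp only [hsv, if_true] at hu
      rcases List.mem_append.mp hu with h | h
      · exact hinv v u h
      · simp at h; subst h; exact hs0
    · simp only [hsv, if_false] at hu
      exact hinv s u hu

theorem pvOuter_inv (KL : List PvNode) (g : PvGraph) (l : List PvNode) :
    ∀ (inv : PvGraph), (∀ x ∈ l, x ∈ KL) → (∀ s u, u ∈ inv.getD s [] → u ∈ KL) →
      ∀ s u, u ∈ (l.foldl (fun inv s =>
          (g.getD s []).foldl (fun inv v => inv.modify v [] (· ++ [s])) inv) inv).getD s [] →
        u ∈ KL := by
  induction l with
  | nil => intro inv _ hinv; exact hinv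
  | cons a t ih =>
    intro inv hl hinv
    simp only [List.foldl_cons]
    exact ih _ (fun x hx => hl x (by simp [hx]))
      (pvInner_inv KL a (hl a (by simp)) (g.getD a []) inv hinv)

theorem pvHG_grapheInverse (g : PvGraph) : pvHG (pvGrapheInverse g) g.keys := by
  unfold pvGrapheInverse pvHG
  intro s u hu
  refine pvOuter_inv g.keys g g.keys _ (fun x hx => hx) ?_ s u hu
  intro s' u' hu'
  rw [pvInit_getD g.keys PySem.Dict.empty (fun x => by rw [PySem.Dict.getD_empty])] at hu'
  cases hu'

theorem pvEtatsFinaux_eq (g : PvGraph) (j : Int) :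
    pvEtatsFinaux g j = g.keys.filter (fun s => g.getD s [] == [] && s.1 == 3 - j) := by
  unfold pvEtatsFinaux
  have h := PySem.List.foldl_append_if (fun s : PvNode => g.getD s [] == [] && s.1 == 3 - j)
    (fun s => s) g.keys []
  simpa using h

theorem pvChildSteps_eq_foldl (gInv : PvGraph) (adv : Int) (N : Nat) :
    ∀ (F : List PvNode) (st : PvSt), (∀ s ∈ F, (s.1 == adv) = true) →
      pvChildSteps adv (fun u st => pvParcours gInv adv N u st) F st =
        F.foldl (fun st s => pvParcours gInv adv N s st) st := by
  intro F
  induction F with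
  | nil => intro st _; simp [pvChildSteps]
  | cons s F ih =>
    intro st hF
    simp only [pvChildSteps, List.foldl_cons, hF s (by simp), if_true]
    exact ih _ (fun x hx => hF x (by simp [hx]))

theorem pvMain (g : PvGraph) (joueur : Int) (d0 : PySem.Dict PvNode Int) :
    (g.keys.filter (fun s => g.getD s [] == [] && s.1 == 3 - joueur)).foldl
        (fun st s => pvParcours (pvGrapheInverse g) (3 - joueur) (g.keys.length + 1) s st)
        ((PySem.Dict.empty : PySem.Dict PvNode Bool), d0) =
      pvMachine (pvGrapheInverse g) (3 - joueur) (g.keys.length + 1)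
        [g.keys.filter (fun s => g.getD s [] == [] && s.1 == 3 - joueur)]
        ((PySem.Dict.empty : PySem.Dict PvNode Bool), d0) := by
  have hg := pvHG_grapheInverse g
  set KL := g.keys with hKL
  set F := g.keys.filter (fun s => g.getD s [] == [] && s.1 == 3 - joueur) with hF
  set st0 : PvSt := ((PySem.Dict.empty : PySem.Dict PvNode Bool), d0) with hst0
  have hFK : ∀ s ∈ F, s ∈ KL := fun s hs => (List.mem_filter.mp hs).1
  have hFadv : ∀ s ∈ F, (s.1 == 3 - joueur) = true := by
    intro s hs
    have h2 := (List.mem_filter.mp hs).2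
    exact (Bool.and_eq_true_iff.mp h2).2
  have hN : pvUnv KL st0 < KL.length + 1 :=
    Nat.lt_succ_of_le (pvUnv_le_length KL st0)
  rw [pvSim (pvGrapheInverse g) (3 - joueur) KL hg (pvUnv KL st0) F [] st0 (KL.length + 1)
      hFK (fun l hl => absurd hl (List.not_mem_nil)) (le_refl _) hN]
  rw [pvMachine.eq_1]
  exact (pvChildSteps_eq_foldl (pvGrapheInverse g) (3 - joueur) (KL.length + 1) F st0 hFadv).symm

-- ===== VERDICT (by name: the statement is the Claim_ definition above) =====
theorem attracteur_spec : Claim_equal_attracteur := by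
  intro arene joueur _hdom _hpre
  unfold Spec_attracteur
  simp only [attracteur, attracteur_alt]
  rw [pvEtatsFinaux_eq, pvMain]
  rfl
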